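-- pv_equiv track=rewrite | github.com/cderxyz/emmmTable | table.py | getColumnsColorCount
-- ===== SOURCE A (Python) =====
-- def getColumnsColorCount(table):
--     columnsColorCount=[]
--     height=len(table)
--     width=len(table[0])
--     for column in range(width):
--         columnColorCount={}
--         for row in range(height):
--             color=table[row][column]
--             if color in columnColorCount:
--                 columnColorCount[color]=columnColorCount[color]+1
--             else:
--                 columnColorCount[color]=1
--         columnsColorCount.append(columnColorCount)
--     return columnsColorCount
-- ===== SOURCE B (Python) =====
-- def getColumnsColorCount(table):
--     return [{color: column.count(color) for color in dict.fromkeys(column)}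
--             for column in zip(*table)]
-- ===== Notes on version B (the rewrite author's own statement) =====
-- stated objective: idiomatic
-- what changed: B transposes the table with zip(*table) and builds each column's frequency dict in one comprehension as ordered dedup (dict.fromkeys) plus per-color count, replacing A's index-driven nested loops with incremental dict updates.
import Mathlib
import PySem

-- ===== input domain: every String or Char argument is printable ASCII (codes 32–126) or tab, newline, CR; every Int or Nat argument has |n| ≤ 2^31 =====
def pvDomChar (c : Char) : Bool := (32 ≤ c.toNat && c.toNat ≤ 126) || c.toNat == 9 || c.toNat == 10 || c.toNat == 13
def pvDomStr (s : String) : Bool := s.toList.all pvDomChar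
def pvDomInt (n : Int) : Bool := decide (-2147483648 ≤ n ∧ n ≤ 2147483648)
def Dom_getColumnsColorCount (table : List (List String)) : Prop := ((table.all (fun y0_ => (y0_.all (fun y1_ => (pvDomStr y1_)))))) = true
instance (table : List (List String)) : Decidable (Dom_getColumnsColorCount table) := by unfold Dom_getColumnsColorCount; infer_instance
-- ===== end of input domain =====

-- B transposes the table (zip(*table)) and builds each column's frequency dict by ordered
-- dedup + count instead of A's index loops with incremental dict updates (objective: idiomatic).


-- ===== PORT A =====
def getColumnsColorCount (table : List (List String)) : List (List (String × Int)) :=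
  let height : Int := table.length
  let width : Int := (PySem.List.pyGetD table 0 []).length
  (PySem.List.pyRange 0 width 1).foldl (fun acc column =>
    let columnColorCount : PySem.Dict String Int :=
      (PySem.List.pyRange 0 height 1).foldl (fun d row =>
        let color := PySem.List.pyGetD (PySem.List.pyGetD table row []) column ""
        if d.contains color then d.insert color ((d.get? color).getD 0 + 1)
        else d.insert color 1) PySem.Dict.empty
    acc ++ [columnColorCount.items]) []

-- ===== PORT B =====
-- zip(*table): truncating transpose, stops at the shortest row (zip of zero iterables is []).
def pvZipStar (rows : List (List String)) : List (List String) :=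
  match rows with
  | [] => []
  | r0 :: rest =>
    if (r0 :: rest).all (fun r => !r.isEmpty) then
      ((r0 :: rest).map (fun r => r.headD "")) :: pvZipStar ((r0 :: rest).map List.tail)
    else []
termination_by (rows.headD []).length
decreasing_by
  simp_all [List.isEmpty_eq_false_iff]
  cases r0 <;> simp_all

def getColumnsColorCount_alt (table : List (List String)) : List (List (String × Int)) :=
  (pvZipStar table).map (fun column =>
    (PySem.List.dedup column).map (fun color => (color, (PySem.List.count column color : Int))))

-- ===== PRECONDITION & SPEC =====
-- Pre_ excludes exactly the inputs where A raises IndexError: the empty table (table[0])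
-- and tables with some row shorter than the first row (table[row][column]).
def Pre_getColumnsColorCount (table : List (List String)) : Prop :=
  table ≠ [] ∧ ∀ r ∈ table, (table.headD []).length ≤ r.length
instance (table : List (List String)) : Decidable (Pre_getColumnsColorCount table) := by unfold Pre_getColumnsColorCount; infer_instance
def pvWitness_getColumnsColorCount : List (List String) := [["red", "blue"], ["red", "red"]]

def Spec_getColumnsColorCount (table : List (List String)) (out : List (List (String × Int))) : Prop := out = getColumnsColorCount_alt table
instance (table : List (List String)) (out : List (List (String × Int))) : Decidable (Spec_getColumnsColorCount table out) := by unfold Spec_getColumnsColorCount; infer_instance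

-- ===== CLAIM (what is proved, stated in full; the proofs are below) =====
def Claim_equal_getColumnsColorCount : Prop := ∀ (table : List (List String)), Dom_getColumnsColorCount table → Pre_getColumnsColorCount table → Spec_getColumnsColorCount table (getColumnsColorCount table)
-- ===== LEMMAS AND PROOFS =====

-- zip(*table) on a table whose rows all have length ≥ the first row's length w
-- is column-by-column indexing up to w.
theorem pvZipStar_eq_cols (w : Nat) :
    ∀ (table : List (List String)), table ≠ [] →
    (∀ r ∈ table, w ≤ r.length) → (table.headD []).length = w →
    pvZipStar table = (List.range w).map (fun j => table.map (fun r => r.getD j "")) := by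
  induction w with
  | zero =>
    intro table hne _ hw
    obtain ⟨r0, rest, rfl⟩ := List.exists_cons_of_ne_nil hne
    have : r0 = [] := by simpa using List.length_eq_zero_iff.mp (by simpa using hw)
    subst this
    simp [pvZipStar]
  | succ n ih =>
    intro table hne hall hw
    obtain ⟨r0, rest, rfl⟩ := List.exists_cons_of_ne_nil hne
    have hcond : (r0 :: rest).all (fun r => !r.isEmpty) = true := by
      simp only [List.all_eq_true]
      intro r hr
      have := hall r hr
      simp only [Bool.not_eq_eq_eq_not, Bool.not_true, List.isEmpty_eq_false_iff]
      exact List.ne_nil_of_length_pos (by omega)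
    rw [pvZipStar, if_pos hcond]
    have htail : pvZipStar ((r0 :: rest).map List.tail) =
        (List.range n).map (fun j => ((r0 :: rest).map List.tail).map (fun r => r.getD j "")) := by
      apply ih
      · simp
      · intro r hr
        simp only [List.mem_map] at hr
        obtain ⟨s, hs, rfl⟩ := hr
        have := hall s hs
        simp only [List.length_tail]
        omega
      · simp at hw ⊢
        omega
    rw [htail, List.range_succ_eq_map]
    simp [List.map_map, Function.comp, Nat.succ_eq_add_one]
    have hh : ∀ r : List String, r.head?.getD "" = r[0]?.getD "" := fun r => by cases r <;> rfl
    exact ⟨hh r0, fun a _ => hh a⟩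

-- A's inner row loop over one column produces exactly the ordered-dedup/count item list.
theorem pvColA (table : List (List String)) (column : Int) :
    (List.foldl (fun (d : PySem.Dict String Int) row =>
        if d.contains (PySem.List.pyGetD (PySem.List.pyGetD table row []) column "") then
          d.insert (PySem.List.pyGetD (PySem.List.pyGetD table row []) column "")
            ((d.get? (PySem.List.pyGetD (PySem.List.pyGetD table row []) column "")).getD 0 + 1)
        else d.insert (PySem.List.pyGetD (PySem.List.pyGetD table row []) column "") 1)
      PySem.Dict.empty ((List.range table.length).map (fun (k : Nat) => (k : Int)))).items
    = (PySem.Set.ofList (table.map (fun r => PySem.List.pyGetD r column ""))).map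
        (fun k => (k, (List.count k (table.map (fun r => PySem.List.pyGetD r column "")) : Int))) := by
  have hstep : (fun (d : PySem.Dict String Int) (r : List String) =>
      if d.contains (PySem.List.pyGetD r column "") then
        d.insert (PySem.List.pyGetD r column "")
          ((d.get? (PySem.List.pyGetD r column "")).getD 0 + 1)
      else d.insert (PySem.List.pyGetD r column "") 1)
      = (fun d r => (fun (d' : PySem.Dict String Int) (c : String) =>
          d'.insert c (d'.getD c 0 + 1)) d (PySem.List.pyGetD r column "")) := by
    funext d r
    by_cases h : d.contains (PySem.List.pyGetD r column "") = true
    · simp [h, PySem.Dict.getD_eq_get?_getD]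
    · rw [if_neg h]
      simp [PySem.Dict.getD_of_not_contains _ _ (by simpa using h)]
  have h2 : List.foldl (fun d r => (fun (d' : PySem.Dict String Int) (c : String) =>
        d'.insert c (d'.getD c 0 + 1)) d (PySem.List.pyGetD r column ""))
        PySem.Dict.empty table
      = PySem.Dict.counter (table.map (fun r => PySem.List.pyGetD r column "")) := by
    rw [← PySem.Dict.foldl_insert_getD_add_one_eq_counter, List.foldl_map]
  rw [show (List.range table.length).map (fun (k : Nat) => (k : Int)) =
      PySem.List.pyRange 0 (table.length : Int) 1 from by rw [PySem.List.pyRange_one]; simp]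
  have h1 : List.foldl (fun (d : PySem.Dict String Int) row =>
        if d.contains (PySem.List.pyGetD (PySem.List.pyGetD table row []) column "") then
          d.insert (PySem.List.pyGetD (PySem.List.pyGetD table row []) column "")
            ((d.get? (PySem.List.pyGetD (PySem.List.pyGetD table row []) column "")).getD 0 + 1)
        else d.insert (PySem.List.pyGetD (PySem.List.pyGetD table row []) column "") 1)
      PySem.Dict.empty (PySem.List.pyRange 0 (table.length : Int) 1)
      = List.foldl (fun (d : PySem.Dict String Int) (r : List String) =>
        if d.contains (PySem.List.pyGetD r column "") then
          d.insert (PySem.List.pyGetD r column "")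
            ((d.get? (PySem.List.pyGetD r column "")).getD 0 + 1)
        else d.insert (PySem.List.pyGetD r column "") 1)
      PySem.Dict.empty table :=
    PySem.List.foldl_pyRange_zero_pyGetD' table []
      (fun (d : PySem.Dict String Int) (r : List String) =>
        if d.contains (PySem.List.pyGetD r column "") then
          d.insert (PySem.List.pyGetD r column "")
            ((d.get? (PySem.List.pyGetD r column "")).getD 0 + 1)
        else d.insert (PySem.List.pyGetD r column "") 1)
      PySem.Dict.empty
  rw [h1, hstep, h2, PySem.Dict.items_counter]

-- ===== VERDICT (by name: the statement is the Claim_ definition above) =====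
theorem getColumnsColorCount_spec : Claim_equal_getColumnsColorCount := by
  intro table _ hpre
  obtain ⟨hne, hall⟩ := hpre
  show getColumnsColorCount table = getColumnsColorCount_alt table
  obtain ⟨r0, rest, rfl⟩ := List.exists_cons_of_ne_nil hne
  unfold getColumnsColorCount getColumnsColorCount_alt
  rw [pvZipStar_eq_cols r0.length (r0 :: rest) (by simp) (by simpa using hall) (by simp)]
  simp only [PySem.List.pyGetD_zero_cons, PySem.List.foldl_append_singleton_eq_map,
    List.nil_append, PySem.List.pyRange_one, Int.sub_zero, Int.toNat_natCast, zero_add,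
    List.map_map]
  apply List.map_congr_left
  intro j hj
  simp only [Function.comp_apply]
  rw [pvColA]
  simp [PySem.List.dedup_eq_ofList, PySem.List.count_eq, PySem.List.pyGetD_natCast]
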